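-- pv_equiv track=rewrite | github.com/imoutidi/Climate_Change_Twitter | Tool_Pack/tools.py | divide_list_into_chunks
-- ===== SOURCE A (Python) =====
-- def divide_list_into_chunks(lst, num_chunks):
--     if num_chunks <= 0:
--         raise ValueError("Number of chunks must be greater than 0")
--     chunk_size = len(lst) // num_chunks
--     remainder = len(lst) % num_chunks
--     chunks = []
--     start = 0
--     for _ in range(num_chunks):
--         if remainder > 0:
--             end = start + chunk_size + 1
--             remainder -= 1
--         else:
--             end = start + chunk_size
--         chunks.append(lst[start:end])
--         start = end
--     return chunks
-- ===== SOURCE B (Python) =====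
-- def divide_list_into_chunks(lst, num_chunks):
--     if num_chunks <= 0:
--         raise ValueError("Number of chunks must be greater than 0")
--     q, r = divmod(len(lst), num_chunks)
--     return [lst[i * q + min(i, r) : (i + 1) * q + min(i + 1, r)]
--             for i in range(num_chunks)]
-- ===== Notes on version B (the rewrite author's own statement) =====
-- stated objective: alternative
-- what changed: Replaces the sequential cursor loop (carried start and decrementing remainder) by a direct comprehension computing each chunk's boundaries with the closed-form index i*q + min(i, r).
import Mathlib
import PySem

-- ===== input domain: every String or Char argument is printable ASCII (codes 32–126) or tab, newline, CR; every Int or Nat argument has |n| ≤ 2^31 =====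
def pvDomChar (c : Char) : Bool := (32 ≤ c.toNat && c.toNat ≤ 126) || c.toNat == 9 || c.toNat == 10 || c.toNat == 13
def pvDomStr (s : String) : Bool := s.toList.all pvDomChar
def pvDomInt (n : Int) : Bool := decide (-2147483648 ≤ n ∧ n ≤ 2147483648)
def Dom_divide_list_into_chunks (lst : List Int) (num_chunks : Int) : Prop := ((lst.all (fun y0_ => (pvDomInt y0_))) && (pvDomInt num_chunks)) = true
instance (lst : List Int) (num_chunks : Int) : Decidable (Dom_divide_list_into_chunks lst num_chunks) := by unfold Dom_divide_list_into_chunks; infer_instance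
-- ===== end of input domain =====

-- B replaces A's sequential cursor loop (carried start, decrementing remainder) by a
-- closed-form boundary formula i*q + min(i, r) per chunk; same cost, different decomposition.

-- ===== PORT A =====
-- A's for-loop over range(num_chunks) with state (start, remainder, chunks)
def divideChunksLoop (lst : List Int) (chunk_size : Int) :
    Nat → Int → Int → List (List Int) → List (List Int)
  | 0, _, _, chunks => chunks
  | fuel + 1, start, remainder, chunks =>
      if remainder > 0 then
        let e := start + chunk_size + 1
        divideChunksLoop lst chunk_size fuel e (remainder - 1)
          (chunks ++ [PySem.List.slice lst (some start) (some e)])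
      else
        let e := start + chunk_size
        divideChunksLoop lst chunk_size fuel e remainder
          (chunks ++ [PySem.List.slice lst (some start) (some e)])

def divide_list_into_chunks (lst : List Int) (num_chunks : Int) : List (List Int) :=
  if num_chunks ≤ 0 then []  -- Python raises ValueError here; excluded by Pre_
  else
    let chunk_size := PySem.Int.floordiv (lst.length : Int) num_chunks
    let remainder := PySem.Int.mod (lst.length : Int) num_chunks
    divideChunksLoop lst chunk_size num_chunks.toNat 0 remainder []

-- ===== PORT B =====
def divide_list_into_chunks_alt (lst : List Int) (num_chunks : Int) : List (List Int) :=
  if num_chunks ≤ 0 then []  -- Python raises ValueError here; excluded by Pre_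
  else
    let q := PySem.Int.floordiv (lst.length : Int) num_chunks
    let r := PySem.Int.mod (lst.length : Int) num_chunks
    (PySem.List.pyRange 0 num_chunks 1).map (fun i =>
      PySem.List.slice lst (some (i * q + min i r)) (some ((i + 1) * q + min (i + 1) r)))

-- ===== PRECONDITION & SPEC =====
-- A raises ValueError when num_chunks <= 0; exactly those inputs are excluded.
def Pre_divide_list_into_chunks (lst : List Int) (num_chunks : Int) : Prop := 0 < num_chunks
instance (lst : List Int) (num_chunks : Int) : Decidable (Pre_divide_list_into_chunks lst num_chunks) := by unfold Pre_divide_list_into_chunks; infer_instance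

def pvWitness_divide_list_into_chunks : List Int × Int := ([1, 2, 3, 4, 5], 2)

def Spec_divide_list_into_chunks (lst : List Int) (num_chunks : Int) (out : List (List Int)) : Prop := out = divide_list_into_chunks_alt lst num_chunks
instance (lst : List Int) (num_chunks : Int) (out : List (List Int)) : Decidable (Spec_divide_list_into_chunks lst num_chunks out) := by unfold Spec_divide_list_into_chunks; infer_instance

-- ===== CLAIM (what is proved, stated in full; the proofs are below) =====
def Claim_equal_divide_list_into_chunks : Prop := ∀ (lst : List Int) (num_chunks : Int), Dom_divide_list_into_chunks lst num_chunks → Pre_divide_list_into_chunks lst num_chunks → Spec_divide_list_into_chunks lst num_chunks (divide_list_into_chunks lst num_chunks)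

-- ===== LEMMAS AND PROOFS =====

-- Loop invariant: starting iteration i, A's cursor is at i*q + min i r and its remainder is
-- r - min i r; the remaining `fuel` iterations emit exactly B's closed-form chunks i, …, i+fuel-1.
theorem divideChunksLoop_closed (lst : List Int) (q r : Int) :
    ∀ (fuel : Nat) (i : Int), 0 ≤ i → ∀ (chunks : List (List Int)),
    divideChunksLoop lst q fuel (i * q + min i r) (r - min i r) chunks
      = chunks ++ (List.range fuel).map (fun (j : Nat) =>
          PySem.List.slice lst (some ((i + (j : Int)) * q + min (i + (j : Int)) r))
            (some ((i + (j : Int) + 1) * q + min (i + (j : Int) + 1) r))) := by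
  intro fuel
  induction fuel with
  | zero => intro i _ chunks; simp [divideChunksLoop]
  | succ n ih =>
    intro i hi chunks
    by_cases hir : i < r
    · have hmin : min i r = i := by omega
      have hmin1 : min (i + 1) r = i + 1 := by omega
      have hpos : r - min i r > 0 := by omega
      rw [divideChunksLoop, if_pos hpos]
      have h1 : i * q + min i r + q + 1 = (i + 1) * q + min (i + 1) r := by
        rw [hmin, hmin1]; ring
      have h2 : r - min i r - 1 = r - min (i + 1) r := by omega
      rw [h1, h2, ih (i + 1) (by omega)]
      rw [List.range_succ_eq_map]
      simp only [List.map_cons, List.map_map, List.append_assoc, List.singleton_append]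
      congr 2
      · push_cast; congr 2 <;> ring_nf
      · apply List.map_congr_left
        intro j _
        simp only [Function.comp]
        congr 3 <;> push_cast <;> ring_nf
    · have hmin : min i r = r := by omega
      have hmin1 : min (i + 1) r = r := by omega
      have hpos : ¬ (r - min i r > 0) := by omega
      rw [divideChunksLoop, if_neg hpos]
      have h1 : i * q + min i r + q = (i + 1) * q + min (i + 1) r := by
        rw [hmin, hmin1]; ring
      have h2 : r - min i r = r - min (i + 1) r := by omega
      rw [h1, h2, ih (i + 1) (by omega)]
      rw [List.range_succ_eq_map]
      simp only [List.map_cons, List.map_map, List.append_assoc, List.singleton_append]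
      congr 2
      · push_cast; congr 2 <;> ring_nf
      · apply List.map_congr_left
        intro j _
        simp only [Function.comp]
        congr 3 <;> push_cast <;> ring_nf

-- ===== VERDICT (by name: the statement is the Claim_ definition above) =====
theorem divide_list_into_chunks_spec : Claim_equal_divide_list_into_chunks := by
  intro lst num_chunks _ hpre
  have hk : ¬ num_chunks ≤ 0 := not_le.mpr hpre
  unfold Spec_divide_list_into_chunks divide_list_into_chunks divide_list_into_chunks_alt
  rw [if_neg hk, if_neg hk]
  set q := PySem.Int.floordiv (lst.length : Int) num_chunks with hq
  set r := PySem.Int.mod (lst.length : Int) num_chunks with hrdef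
  have hr : 0 ≤ r := by
    rw [hrdef, PySem.Int.mod_eq_emod_of_pos hpre]
    exact Int.emod_nonneg _ (by omega)
  have h0 : (0 : Int) * q + min 0 r = 0 := by omega
  have h0' : r - min 0 r = r := by omega
  have key := divideChunksLoop_closed lst q r num_chunks.toNat 0 le_rfl []
  rw [h0, h0'] at key
  rw [key, List.nil_append, PySem.List.pyRange_one]
  simp only [Int.sub_zero, List.map_map]
  apply List.map_congr_left
  intro j _
  simp only [Function.comp]
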